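-- pv_equiv track=rewrite | github.com/Aitiipse/clasificacion-huevos-tipo | huevos.py | clasificacion_huevos
-- ===== SOURCE A (Python) =====
-- def clasificacion_huevos(lista_huevos):
--
--     tipos = {'A':[],'AA':[],'AAA':[],'BC':[]}
--
--     for huevo in lista_huevos:
--         if huevo >= 53 and huevo < 60 :
--             tipo = 'A'
--         elif huevo >= 60 and huevo < 67:
--             tipo = 'AA'
--         elif huevo >= 67 :
--             tipo = 'AAA'
--         else:
--             tipo = 'BC'
--
--         if tipo in tipos:
--             tipos[tipo].append(huevo)
--         else:
--             tipos[tipo] = [huevo]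
--
--     return tipos
-- ===== SOURCE B (Python) =====
-- def clasificacion_huevos(lista_huevos):
--     return {
--         'A':   [h for h in lista_huevos if 53 <= h < 60],
--         'AA':  [h for h in lista_huevos if 60 <= h < 67],
--         'AAA': [h for h in lista_huevos if h >= 67],
--         'BC':  [h for h in lista_huevos if h < 53],
--     }
-- ===== Notes on version B (the rewrite author's own statement) =====
-- stated objective: simpler
-- what changed: Replaces A's single pass with a per-element branch and dict mutation by building the dict literal directly from four independent filtering comprehensions, one per category.
import Mathlib
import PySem

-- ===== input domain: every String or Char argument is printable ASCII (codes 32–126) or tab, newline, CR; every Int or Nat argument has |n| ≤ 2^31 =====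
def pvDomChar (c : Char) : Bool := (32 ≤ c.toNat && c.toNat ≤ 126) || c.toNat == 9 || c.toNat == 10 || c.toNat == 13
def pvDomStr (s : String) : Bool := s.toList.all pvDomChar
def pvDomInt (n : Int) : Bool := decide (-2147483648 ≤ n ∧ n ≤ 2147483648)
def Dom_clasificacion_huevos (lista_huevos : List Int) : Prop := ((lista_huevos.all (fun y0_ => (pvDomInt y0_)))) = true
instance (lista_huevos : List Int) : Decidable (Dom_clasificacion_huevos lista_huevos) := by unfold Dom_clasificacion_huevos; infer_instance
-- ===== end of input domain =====

-- B builds the dict directly from four independent filtering comprehensions instead of A's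
-- single mutating pass with a per-element branch (objective: simpler).

-- ===== PORT A =====
-- the `tipo` chosen by A's if/elif chain for one egg
def pvTipoA (huevo : Int) : String :=
  if 53 ≤ huevo ∧ huevo < 60 then "A"
  else if 60 ≤ huevo ∧ huevo < 67 then "AA"
  else if 67 ≤ huevo then "AAA"
  else "BC"

-- one iteration of A's loop body (branch order as in the Python)
def pvStepA (tipos : PySem.Dict String (List Int)) (huevo : Int) : PySem.Dict String (List Int) :=
  let tipo := pvTipoA huevo
  if tipos.contains tipo then
    tipos.modify tipo [] (fun l => l ++ [huevo])   -- tipos[tipo].append(huevo)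
  else
    tipos.insert tipo [huevo]

def clasificacion_huevos (lista_huevos : List Int) : List (String × List Int) :=
  (lista_huevos.foldl pvStepA
    (PySem.Dict.ofList [("A", ([] : List Int)), ("AA", []), ("AAA", []), ("BC", [])])).items

-- ===== PORT B =====
def clasificacion_huevos_alt (lista_huevos : List Int) : List (String × List Int) :=
  [ ("A",   lista_huevos.filter (fun h => 53 ≤ h ∧ h < 60)),
    ("AA",  lista_huevos.filter (fun h => 60 ≤ h ∧ h < 67)),
    ("AAA", lista_huevos.filter (fun h => 67 ≤ h)),
    ("BC",  lista_huevos.filter (fun h => h < 53)) ]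

-- ===== PRECONDITION & SPEC =====
def Spec_clasificacion_huevos (lista_huevos : List Int) (out : List (String × List Int)) : Prop := out = clasificacion_huevos_alt lista_huevos
instance (lista_huevos : List Int) (out : List (String × List Int)) : Decidable (Spec_clasificacion_huevos lista_huevos out) := by unfold Spec_clasificacion_huevos; infer_instance

-- ===== CLAIM (what is proved, stated in full; the proofs are below) =====
def Claim_equal_clasificacion_huevos : Prop := ∀ (lista_huevos : List Int), Dom_clasificacion_huevos lista_huevos → Spec_clasificacion_huevos lista_huevos (clasificacion_huevos lista_huevos)

-- ===== LEMMAS AND PROOFS =====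

-- loop invariant: folding A's step over any suffix, from the four fixed keys with
-- arbitrary accumulated lists, appends exactly the four filters of that suffix
theorem pvStepA_eval (as bs cs ds : List Int) (h : Int) :
    pvStepA (PySem.Dict.mk [("A", as), ("AA", bs), ("AAA", cs), ("BC", ds)]) h =
    PySem.Dict.mk
      (if 53 ≤ h ∧ h < 60 then [("A", as ++ [h]), ("AA", bs), ("AAA", cs), ("BC", ds)]
       else if 60 ≤ h ∧ h < 67 then [("A", as), ("AA", bs ++ [h]), ("AAA", cs), ("BC", ds)]
       else if 67 ≤ h then [("A", as), ("AA", bs), ("AAA", cs ++ [h]), ("BC", ds)]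
       else [("A", as), ("AA", bs), ("AAA", cs), ("BC", ds ++ [h])]) := by
  by_cases h1 : 53 ≤ h ∧ h < 60
  · simp [pvStepA, pvTipoA, h1, PySem.Dict.contains, PySem.Dict.modify, PySem.Dict.getD,
      PySem.Dict.get?, PySem.Dict.insert]
  · by_cases h2 : 60 ≤ h ∧ h < 67
    · simp [pvStepA, pvTipoA, h1, h2, PySem.Dict.contains, PySem.Dict.modify, PySem.Dict.getD,
        PySem.Dict.get?, PySem.Dict.insert]
    · by_cases h3 : 67 ≤ h
      · simp [pvStepA, pvTipoA, h1, h2, h3, PySem.Dict.contains, PySem.Dict.modify,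
          PySem.Dict.getD, PySem.Dict.get?, PySem.Dict.insert]
      · simp [pvStepA, pvTipoA, h1, h2, h3, PySem.Dict.contains, PySem.Dict.modify,
          PySem.Dict.getD, PySem.Dict.get?, PySem.Dict.insert]

-- loop invariant: folding A's step over any suffix, from the four fixed keys with
-- arbitrary accumulated lists, appends exactly the four filters of that suffix
theorem clasificacion_loop (l : List Int) (as bs cs ds : List Int) :
    (l.foldl pvStepA (PySem.Dict.mk [("A", as), ("AA", bs), ("AAA", cs), ("BC", ds)])) =
    PySem.Dict.mk
      [ ("A",   as ++ l.filter (fun h => 53 ≤ h ∧ h < 60)),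
        ("AA",  bs ++ l.filter (fun h => 60 ≤ h ∧ h < 67)),
        ("AAA", cs ++ l.filter (fun h => 67 ≤ h)),
        ("BC",  ds ++ l.filter (fun h => h < 53)) ] := by
  induction l generalizing as bs cs ds with
  | nil => simp
  | cons h t ih =>
    rw [List.foldl_cons, pvStepA_eval]
    by_cases h1 : 53 ≤ h ∧ h < 60
    · rw [if_pos h1]
      rw [ih]
      simp [List.filter_cons, h1]
      omega
    · by_cases h2 : 60 ≤ h ∧ h < 67
      · rw [if_neg h1, if_pos h2]
        rw [ih]
        simp [List.filter_cons, h1, h2]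
        omega
      · by_cases h3 : 67 ≤ h
        · rw [if_neg h1, if_neg h2, if_pos h3]
          rw [ih]
          simp [List.filter_cons, h1, h2, h3]
          omega
        · rw [if_neg h1, if_neg h2, if_neg h3]
          rw [ih]
          simp [List.filter_cons, h1, h2, h3]
          omega

-- ===== VERDICT (by name: the statement is the Claim_ definition above) =====
theorem clasificacion_huevos_spec : Claim_equal_clasificacion_huevos := by
  intro l _
  unfold Spec_clasificacion_huevos clasificacion_huevos clasificacion_huevos_alt
  rw [show (PySem.Dict.ofList [("A", ([] : List Int)), ("AA", []), ("AAA", []), ("BC", [])]) =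
      PySem.Dict.mk [("A", []), ("AA", []), ("AAA", []), ("BC", [])] from rfl]
  rw [clasificacion_loop]
  rfl
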